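-- pv_equiv track=rewrite | github.com/shunsuke-toba/kaggle-google-code-golf-2025 | arc_gen_common.py | edgefree_pixels
-- ===== SOURCE A (Python) =====
-- def edgefree_pixels(ingrid):
--   """Returns pixels that are edgefree (no adjacent neighbors along an edge)."""
--   width, height = len(ingrid[0]), len(ingrid)
--   def get_val(r, c):
--     if r < 0 or r >= height or c < 0 or c >= width: return 0
--     return 1 if ingrid[r][c] > 0 else 0
--   pixels = []
--   for r in range(height):
--     for c in range(width):
--       if ingrid[r][c] == 0: continue
--       friends = 0
--       for dr, dc in [(1, 0), (0, 1), (-1, 0), (0, -1)]: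
--         friends += get_val(r + dr, c + dc)
--       if friends > 0: continue
--       pixels.append((r, c))
--   return pixels
-- ===== SOURCE B (Python) =====
-- def edgefree_pixels(ingrid):
--   """Returns pixels that are edgefree (no adjacent neighbors along an edge)."""
--   width, height = len(ingrid[0]), len(ingrid)
--   counts = {}
--   for r in range(height):
--     for c in range(width):
--       if ingrid[r][c] > 0:
--         for n in ((r + 1, c), (r - 1, c), (r, c + 1), (r, c - 1)):
--           counts[n] = counts.get(n, 0) + 1
--   pixels = []
--   for r in range(height):
--     for c in range(width):
--       if ingrid[r][c] != 0 and counts.get((r, c), 0) == 0: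
--         pixels.append((r, c))
--   return pixels
-- ===== Notes on version B (the rewrite author's own statement) =====
-- stated objective: alternative
-- what changed: Replaces per-pixel gathering of bounds-checked neighbor values (A's get_val closure, 4 calls per cell) with a scatter pass that builds a dict of neighbor-adjacency counts once, then a second row-major pass emits occupied cells whose count entry is absent.
import Mathlib
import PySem

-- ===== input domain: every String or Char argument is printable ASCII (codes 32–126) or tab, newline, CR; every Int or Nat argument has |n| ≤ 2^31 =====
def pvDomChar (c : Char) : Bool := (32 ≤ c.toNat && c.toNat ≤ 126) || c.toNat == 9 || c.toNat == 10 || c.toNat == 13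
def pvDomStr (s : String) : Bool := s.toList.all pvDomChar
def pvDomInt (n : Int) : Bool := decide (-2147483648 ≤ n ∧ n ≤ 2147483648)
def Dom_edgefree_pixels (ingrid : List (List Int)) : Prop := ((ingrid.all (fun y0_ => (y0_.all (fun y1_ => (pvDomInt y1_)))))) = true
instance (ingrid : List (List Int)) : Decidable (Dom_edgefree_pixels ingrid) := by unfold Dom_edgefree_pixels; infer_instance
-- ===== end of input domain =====

-- B replaces A's per-pixel gather of bounds-checked neighbor values with a scattered
-- neighbor-count dictionary built in one pass, then a second row-major emitting pass.

-- ===== PORT A =====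
-- the indexing expression ingrid[r][c] both ports read (default 0 is unreachable under Pre_)
def egp_val (ingrid : List (List Int)) (r c : Int) : Int :=
  PySem.List.pyGetD (PySem.List.pyGetD ingrid r []) c 0

-- A's closure get_val(r, c) (bounds check, then 1 iff the cell is strictly positive)
def egp_get_val (ingrid : List (List Int)) (height width : Int) (r c : Int) : Int :=
  if r < 0 ∨ height ≤ r ∨ c < 0 ∨ width ≤ c then 0
  else if 0 < egp_val ingrid r c then 1 else 0

def edgefree_pixels (ingrid : List (List Int)) : List (Int × Int) :=
  let width : Int := (PySem.List.pyGetD ingrid 0 []).length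
  let height : Int := ingrid.length
  (PySem.List.pyRange 0 height 1).foldl (fun pixels r =>
    (PySem.List.pyRange 0 width 1).foldl (fun pixels c =>
      if egp_val ingrid r c = 0 then pixels
      else
        let friends := [((1 : Int), (0 : Int)), (0, 1), (-1, 0), (0, -1)].foldl
          (fun f d => f + egp_get_val ingrid height width (r + d.1) (c + d.2)) 0
        if 0 < friends then pixels else pixels ++ [(r, c)]) pixels) []

-- ===== PORT B =====
-- the tuple of 4 edge-neighbor coordinates Source B scatters into
def egp_neighbors (r c : Int) : List (Int × Int) :=
  [(r + 1, c), (r - 1, c), (r, c + 1), (r, c - 1)]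

def edgefree_pixels_alt (ingrid : List (List Int)) : List (Int × Int) :=
  let width : Int := (PySem.List.pyGetD ingrid 0 []).length
  let height : Int := ingrid.length
  let counts : PySem.Dict (Int × Int) Int :=
    (PySem.List.pyRange 0 height 1).foldl (fun d r =>
      (PySem.List.pyRange 0 width 1).foldl (fun d c =>
        if 0 < egp_val ingrid r c then
          (egp_neighbors r c).foldl (fun d n => d.insert n (d.getD n 0 + 1)) d
        else d) d) PySem.Dict.empty
  (PySem.List.pyRange 0 height 1).foldl (fun pixels r =>
    (PySem.List.pyRange 0 width 1).foldl (fun pixels c =>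
      if egp_val ingrid r c ≠ 0 ∧ counts.getD (r, c) 0 = 0
      then pixels ++ [(r, c)] else pixels) pixels) []

-- ===== PRECONDITION & SPEC =====
-- Pre_ excludes exactly the inputs on which the Python A raises IndexError: the empty
-- grid (len(ingrid[0]) fails) and ragged grids with a row shorter than the first row
-- (ingrid[r][c] fails for some c < width).
def Pre_edgefree_pixels (ingrid : List (List Int)) : Prop :=
  ingrid ≠ [] ∧ ∀ row ∈ ingrid, (PySem.List.pyGetD ingrid 0 []).length ≤ row.length
instance (ingrid : List (List Int)) : Decidable (Pre_edgefree_pixels ingrid) := by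
  unfold Pre_edgefree_pixels; infer_instance
def pvWitness_edgefree_pixels : List (List Int) := [[1, 0], [0, 2]]

def Spec_edgefree_pixels (ingrid : List (List Int)) (out : List (Int × Int)) : Prop := out = edgefree_pixels_alt ingrid
instance (ingrid : List (List Int)) (out : List (Int × Int)) : Decidable (Spec_edgefree_pixels ingrid out) := by unfold Spec_edgefree_pixels; infer_instance

-- ===== CLAIM (what is proved, stated in full; the proofs are below) =====
def Claim_equal_edgefree_pixels : Prop := ∀ (ingrid : List (List Int)), Dom_edgefree_pixels ingrid → Pre_edgefree_pixels ingrid → Spec_edgefree_pixels ingrid (edgefree_pixels ingrid)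

-- ===== LEMMAS AND PROOFS =====

-- the flattened list of all scattered neighbor keys of B's first pass
def egp_scatter (ingrid : List (List Int)) (height width : Int) : List (Int × Int) :=
  (PySem.List.pyRange 0 height 1).flatMap (fun r =>
    (PySem.List.pyRange 0 width 1).flatMap (fun c =>
      if 0 < egp_val ingrid r c then egp_neighbors r c else []))

lemma egp_foldl_flatMap {α β γ : Type} (l : List α) (f : α → List β) (g : γ → β → γ)
    (i : γ) : (l.flatMap f).foldl g i = l.foldl (fun a x => (f x).foldl g a) i := by
  induction l generalizing i with
  | nil => rfl
  | cons x xs ih => simp [List.flatMap_cons, List.foldl_append, ih]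

lemma egp_counts_getD (ingrid : List (List Int)) (height width : Int) (p : Int × Int) :
    ((PySem.List.pyRange 0 height 1).foldl (fun d r =>
      (PySem.List.pyRange 0 width 1).foldl (fun d c =>
        if 0 < egp_val ingrid r c then
          (egp_neighbors r c).foldl (fun d n => d.insert n (d.getD n 0 + 1)) d
        else d) d) (PySem.Dict.empty : PySem.Dict (Int × Int) Int)).getD p 0
    = ((egp_scatter ingrid height width).count p : Int) := by
  have h1 : ((PySem.List.pyRange 0 height 1).foldl (fun d r =>
      (PySem.List.pyRange 0 width 1).foldl (fun d c =>
        if 0 < egp_val ingrid r c then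
          (egp_neighbors r c).foldl (fun d n => d.insert n (d.getD n 0 + 1)) d
        else d) d) (PySem.Dict.empty : PySem.Dict (Int × Int) Int))
      = (egp_scatter ingrid height width).foldl
        (fun (d : PySem.Dict (Int × Int) Int) n => d.insert n (d.getD n 0 + 1))
        PySem.Dict.empty := by
    rw [egp_scatter, egp_foldl_flatMap]
    apply PySem.List.foldl_congr_mem
    intro d r _
    rw [egp_foldl_flatMap]
    apply PySem.List.foldl_congr_mem
    intro d c _
    split <;> rfl
  refine (congrArg (fun d => PySem.Dict.getD d p 0) h1).trans ?_
  rw [PySem.Dict.getD_foldl_insert_add_one, PySem.Dict.getD_empty]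
  simp

lemma egp_neighbors_symm (a b x y : Int) :
    (a, b) ∈ egp_neighbors x y ↔ (x, y) ∈ egp_neighbors a b := by
  simp [egp_neighbors, Prod.ext_iff]
  omega

lemma egp_mem_scatter (ingrid : List (List Int)) (height width : Int) (a b : Int) :
    (a, b) ∈ egp_scatter ingrid height width ↔
    ∃ x y, (x, y) ∈ egp_neighbors a b ∧ 0 ≤ x ∧ x < height ∧ 0 ≤ y ∧ y < width ∧
      0 < egp_val ingrid x y := by
  simp only [egp_scatter, List.mem_flatMap, PySem.List.mem_pyRange_one]
  constructor
  · rintro ⟨r, ⟨hr0, hrh⟩, c, ⟨hc0, hcw⟩, hp⟩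
    by_cases hv : 0 < egp_val ingrid r c
    · rw [if_pos hv] at hp
      exact ⟨r, c, (egp_neighbors_symm a b r c).mp hp, hr0, hrh, hc0, hcw, hv⟩
    · rw [if_neg hv] at hp; cases hp
  · rintro ⟨x, y, hn, hx0, hxh, hy0, hyw, hv⟩
    exact ⟨x, ⟨hx0, hxh⟩, y, ⟨hy0, hyw⟩, by
      rw [if_pos hv]; exact (egp_neighbors_symm a b x y).mpr hn⟩

lemma egp_get_val_eq (ingrid : List (List Int)) (height width r c : Int) :
    egp_get_val ingrid height width r c =
    if 0 ≤ r ∧ r < height ∧ 0 ≤ c ∧ c < width ∧ 0 < egp_val ingrid r c then 1 else 0 := by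
  rw [egp_get_val]
  by_cases hb : r < 0 ∨ height ≤ r ∨ c < 0 ∨ width ≤ c
  · rw [if_pos hb, if_neg]
    rintro ⟨h1, h2, h3, h4, -⟩; omega
  · rw [if_neg hb]
    by_cases hv : 0 < egp_val ingrid r c
    · rw [if_pos, if_pos ⟨by omega, by omega, by omega, by omega, hv⟩]
      exact hv
    · rw [if_neg, if_neg]
      · rintro ⟨-, -, -, -, h⟩; exact hv h
      · exact hv

lemma egp_sum4 (C1 C2 C3 C4 : Prop) [Decidable C1] [Decidable C2] [Decidable C3]
    [Decidable C4] :
    (0 < (0 : Int) + (if C1 then (1 : Int) else 0) + (if C2 then (1 : Int) else 0)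
      + (if C3 then (1 : Int) else 0) + (if C4 then (1 : Int) else 0)) ↔
    (C1 ∨ C2 ∨ C3 ∨ C4) := by
  split_ifs <;> norm_num <;> tauto

-- friends = 0 at (r, c) iff (r, c) never received a scatter increment
lemma egp_cond_iff (ingrid : List (List Int)) (height width r c : Int) :
    (¬ 0 < [((1 : Int), (0 : Int)), (0, 1), (-1, 0), (0, -1)].foldl
        (fun f d => f + egp_get_val ingrid height width (r + d.1) (c + d.2)) 0) ↔
    ((egp_scatter ingrid height width).count (r, c) : Int) = 0 := by
  rw [show (((egp_scatter ingrid height width).count (r, c) : Int) = 0) ↔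
      (egp_scatter ingrid height width).count (r, c) = 0 from by omega, List.count_eq_zero]
  simp only [List.foldl_cons, List.foldl_nil]
  rw [egp_get_val_eq, egp_get_val_eq, egp_get_val_eq, egp_get_val_eq]
  simp only [add_zero, ← sub_eq_add_neg]
  rw [egp_sum4, egp_mem_scatter]
  apply not_congr
  constructor
  · rintro (h | h | h | h)
    · exact ⟨r + 1, c, by simp [egp_neighbors], h⟩
    · exact ⟨r, c + 1, by simp [egp_neighbors], h⟩
    · exact ⟨r - 1, c, by simp [egp_neighbors], h⟩
    · exact ⟨r, c - 1, by simp [egp_neighbors], h⟩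
  · rintro ⟨x, y, hn, hrest⟩
    simp only [egp_neighbors, List.mem_cons, List.not_mem_nil, or_false,
      Prod.mk.injEq] at hn
    rcases hn with ⟨hx, hy⟩ | ⟨hx, hy⟩ | ⟨hx, hy⟩ | ⟨hx, hy⟩ <;> subst hx <;> subst hy
    · exact Or.inl hrest
    · exact Or.inr (Or.inr (Or.inl hrest))
    · exact Or.inr (Or.inl hrest)
    · exact Or.inr (Or.inr (Or.inr hrest))

lemma egp_main (ingrid : List (List Int)) :
    edgefree_pixels ingrid = edgefree_pixels_alt ingrid := by
  simp only [edgefree_pixels, edgefree_pixels_alt]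
  apply PySem.List.foldl_congr_mem
  intro acc r _
  apply PySem.List.foldl_congr_mem
  intro acc' c _
  rw [egp_counts_getD]
  by_cases hv : egp_val ingrid r c = 0
  · rw [if_pos hv, if_neg (by simp [hv])]
  · rw [if_neg hv]
    by_cases hf : 0 < [((1 : Int), (0 : Int)), (0, 1), (-1, 0), (0, -1)].foldl
        (fun f d => f + egp_get_val ingrid (ingrid.length : Int)
          ((PySem.List.pyGetD ingrid 0 []).length : Int) (r + d.1) (c + d.2)) 0
    · rw [if_pos hf, if_neg]
      rintro ⟨-, hc⟩
      exact (egp_cond_iff ingrid _ _ r c).mpr hc hf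
    · rw [if_neg hf, if_pos ⟨hv, (egp_cond_iff ingrid _ _ r c).mp hf⟩]

-- ===== VERDICT (by name: the statement is the Claim_ definition above) =====
theorem edgefree_pixels_spec : Claim_equal_edgefree_pixels := by
  intro ingrid _ _
  exact egp_main ingrid
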